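-- pv_equiv track=rewrite | github.com/LeaFeranah/TP_ML3_14_02_2025 | ml_fanorona.py | get_move_from_bitboards
-- ===== SOURCE A (Python) =====
-- def get_move_from_bitboards(b1, b2):
--     # Trouver la différence entre les deux bitboards
--     diff = b1 ^ b2
--
--     # Initialiser les variables pour stocker les indices
--     start_index = None
--     end_index = None
--
--     # Trouver les indices de départ et d'arrivée
--     for i in range(9):
--         if (diff >> i) & 1:
--             if (b1 >> i) & 1:
--                 start_index = i
--             else:
--                 end_index = i
--
--     # Convertir les indices en coordonnées (row, col)
--     start_row, start_col = divmod(start_index, 3)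
--     end_row, end_col = divmod(end_index, 3)
--
--     return (start_row, start_col), (end_row, end_col)
-- ===== SOURCE B (Python) =====
-- def get_move_from_bitboards(b1, b2):
--     # Bit that moved: set in one board, clear in the other (board = low 9 bits).
--     start_mask = b1 & ~b2 & 0x1FF
--     end_mask = b2 & ~b1 & 0x1FF
--     start_index = start_mask.bit_length() - 1 if start_mask else None
--     end_index = end_mask.bit_length() - 1 if end_mask else None
--     return divmod(start_index, 3), divmod(end_index, 3)
-- ===== Notes on version B (the rewrite author's own statement) =====
-- stated objective: idiomatic
-- what changed: Replaces the 9-step bit-scanning loop with direct bitmask arithmetic: start/end masks b1&~b2&0x1FF and b2&~b1&0x1FF, highest set bit taken via int.bit_length().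
import Mathlib
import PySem

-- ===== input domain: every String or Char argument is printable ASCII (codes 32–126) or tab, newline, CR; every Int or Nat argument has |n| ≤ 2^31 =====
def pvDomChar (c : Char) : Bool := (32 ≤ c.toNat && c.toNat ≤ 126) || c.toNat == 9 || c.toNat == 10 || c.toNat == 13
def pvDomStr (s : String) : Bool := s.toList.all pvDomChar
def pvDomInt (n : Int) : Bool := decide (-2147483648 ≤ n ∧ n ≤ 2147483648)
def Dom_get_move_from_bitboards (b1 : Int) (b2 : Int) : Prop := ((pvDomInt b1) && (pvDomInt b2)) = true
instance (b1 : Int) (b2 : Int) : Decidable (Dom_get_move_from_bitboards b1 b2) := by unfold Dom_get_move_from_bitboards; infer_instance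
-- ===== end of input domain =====

-- B replaces A's 9-step bit-scanning loop by direct bitmask arithmetic (masks + bit_length); equivalence is about the return value.

-- ===== PORT A =====
-- The loop variable i ranges over pyRange 0 9 1 (so i is 0..8, nonnegative): i.toNat is exact for Python's `>> i`.
def get_move_from_bitboards (b1 : Int) (b2 : Int) : (Int × Int) × (Int × Int) :=
  let diff := PySem.Int.bxor b1 b2
  let r := (PySem.List.pyRange 0 9 1).foldl
    (fun (st : Option Int × Option Int) (i : Int) =>
      if PySem.Int.band (diff >>> i.toNat) 1 ≠ 0 then
        if PySem.Int.band (b1 >>> i.toNat) 1 ≠ 0 then (some i, st.2) else (st.1, some i)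
      else st)
    (none, none)
  match r with
  | (some s, some e) =>
      ((PySem.Int.floordiv s 3, PySem.Int.mod s 3), (PySem.Int.floordiv e 3, PySem.Int.mod e 3))
  | _ => ((0, 0), (0, 0))  -- Python raises TypeError here (divmod on None); excluded by Pre_

-- ===== PORT B =====
def get_move_from_bitboards_alt (b1 : Int) (b2 : Int) : (Int × Int) × (Int × Int) :=
  let start_mask := PySem.Int.band (PySem.Int.band b1 (Int.not b2)) 511
  let end_mask := PySem.Int.band (PySem.Int.band b2 (Int.not b1)) 511
  let start_index : Option Int :=
    if start_mask ≠ 0 then some ((PySem.Int.bitLength start_mask : Int) - 1) else none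
  let end_index : Option Int :=
    if end_mask ≠ 0 then some ((PySem.Int.bitLength end_mask : Int) - 1) else none
  match start_index with
  | none => ((0, 0), (0, 0))  -- Python raises TypeError here (divmod on None); excluded by Pre_
  | some s =>
    match end_index with
    | none => ((0, 0), (0, 0))  -- TypeError likewise
    | some e =>
      ((PySem.Int.floordiv s 3, PySem.Int.mod s 3), (PySem.Int.floordiv e 3, PySem.Int.mod e 3))

-- ===== PRECONDITION & SPEC =====
-- Pre_ excludes exactly the inputs on which A raises TypeError (divmod on a None index): some bit of
-- b1^b2 below bit 9 must be set in b1, and some such bit must be set in b2.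
def Pre_get_move_from_bitboards (b1 : Int) (b2 : Int) : Prop :=
  PySem.Int.band (PySem.Int.band b1 (Int.not b2)) 511 ≠ 0 ∧
  PySem.Int.band (PySem.Int.band b2 (Int.not b1)) 511 ≠ 0
instance (b1 : Int) (b2 : Int) : Decidable (Pre_get_move_from_bitboards b1 b2) := by
  unfold Pre_get_move_from_bitboards; infer_instance
def pvWitness_get_move_from_bitboards : Int × Int := (1, 2)
def Spec_get_move_from_bitboards (b1 : Int) (b2 : Int) (out : (Int × Int) × (Int × Int)) : Prop := out = get_move_from_bitboards_alt b1 b2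
instance (b1 : Int) (b2 : Int) (out : (Int × Int) × (Int × Int)) : Decidable (Spec_get_move_from_bitboards b1 b2 out) := by unfold Spec_get_move_from_bitboards; infer_instance

-- ===== CLAIM (what is proved, stated in full; the proofs are below) =====
def Claim_equal_get_move_from_bitboards : Prop := ∀ (b1 : Int) (b2 : Int), Dom_get_move_from_bitboards b1 b2 → Pre_get_move_from_bitboards b1 b2 → Spec_get_move_from_bitboards b1 b2 (get_move_from_bitboards b1 b2)

-- ===== LEMMAS AND PROOFS =====

-- Nat groundwork: value identities connecting &&&/ldiff to subtraction.
theorem nat_and_div_two (m n : ℕ) : (m &&& n) / 2 = (m / 2) &&& (n / 2) := by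
  apply Nat.eq_of_testBit_eq
  intro k
  rw [Nat.testBit_and, ← Nat.testBit_succ, ← Nat.testBit_succ, ← Nat.testBit_succ,
    Nat.testBit_and]

theorem nat_ldiff_div_two (m n : ℕ) : (m.ldiff n) / 2 = (m / 2).ldiff (n / 2) := by
  apply Nat.eq_of_testBit_eq
  intro k
  rw [Nat.testBit_ldiff, ← Nat.testBit_succ, ← Nat.testBit_succ, ← Nat.testBit_succ,
    Nat.testBit_ldiff]

theorem nat_and_mod_two (m n : ℕ) : ((m &&& n) % 2 = 1) ↔ (m % 2 = 1 ∧ n % 2 = 1) := by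
  have h := Nat.testBit_and m n 0
  simp only [Nat.testBit_zero] at h
  simpa using congrArg (· = true) h |>.to_iff

theorem nat_ldiff_mod_two (m n : ℕ) : ((m.ldiff n) % 2 = 1) ↔ (m % 2 = 1 ∧ ¬ n % 2 = 1) := by
  have h := Nat.testBit_ldiff m n 0
  simp only [Nat.testBit_zero] at h
  simpa using congrArg (· = true) h |>.to_iff

theorem nat_and_add_ldiff : ∀ m n : ℕ, (m &&& n) + m.ldiff n = m := by
  intro m
  induction m using Nat.strong_induction_on with
  | _ m ih =>
    intro n
    rcases Nat.eq_zero_or_pos m with hm | hm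
    · subst hm
      have h1 : (0 : ℕ) &&& n = 0 := Nat.zero_and n
      have h2 : Nat.ldiff 0 n = 0 := by
        apply Nat.eq_of_testBit_eq; intro k; simp [Nat.testBit_ldiff]
      omega
    · have hlt : m / 2 < m := Nat.div_lt_self hm (by norm_num)
      have IH := ih (m / 2) hlt (n / 2)
      have e1 : m &&& n = 2 * ((m / 2) &&& (n / 2)) + (m &&& n) % 2 := by
        rw [← nat_and_div_two]; omega
      have e2 : m.ldiff n = 2 * ((m / 2).ldiff (n / 2)) + (m.ldiff n) % 2 := by
        rw [← nat_ldiff_div_two]; omega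
      have p1 := nat_and_mod_two m n
      have p2 := nat_ldiff_mod_two m n
      omega

theorem nat_sub_and_eq_ldiff (m n : ℕ) : m - (m &&& n) = m.ldiff n := by
  have := nat_and_add_ldiff m n; omega

-- PySem's Python-exact bitwise ops agree with Mathlib's Int.land / Int.xor; Int.not is Int.lnot.
theorem band_eq_land : ∀ a b : Int, PySem.Int.band a b = Int.land a b := by
  have hpos : ∀ k : ℕ, (0:Int) ≤ Int.ofNat k := fun k => Int.natCast_nonneg k
  have hneg : ∀ k : ℕ, ¬ (0:Int) ≤ Int.negSucc k := fun k => by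
    rw [Int.negSucc_eq]; omega
  have hval : ∀ k : ℕ, (-(Int.negSucc k) - 1) = (k : Int) := fun k => by
    rw [Int.negSucc_eq]; ring
  intro a b
  cases a with
  | ofNat m =>
    cases b with
    | ofNat n =>
      unfold PySem.Int.band
      rw [if_pos (hpos m), if_pos (hpos n)]
      rfl
    | negSucc n =>
      unfold PySem.Int.band
      rw [if_pos (hpos m), if_neg (hneg n), hval n]
      show ((m - (m &&& ((n : Int)).toNat) : ℕ) : Int) = _
      rw [Int.toNat_natCast, nat_sub_and_eq_ldiff]
      rfl
  | negSucc m =>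
    cases b with
    | ofNat n =>
      unfold PySem.Int.band
      rw [if_neg (hneg m), if_pos (hpos n), hval m]
      show ((n - (n &&& ((m : Int)).toNat) : ℕ) : Int) = _
      rw [Int.toNat_natCast, nat_sub_and_eq_ldiff]
      rfl
    | negSucc n =>
      unfold PySem.Int.band
      rw [if_neg (hneg m), if_neg (hneg n), hval m, hval n]
      rw [Int.toNat_natCast, Int.toNat_natCast]
      show -((m ||| n : ℕ) : Int) - 1 = Int.negSucc (m ||| n)
      rw [Int.negSucc_eq]; ring

theorem bxor_eq_xor : ∀ a b : Int, PySem.Int.bxor a b = Int.xor a b := by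
  have hpos : ∀ k : ℕ, (0:Int) ≤ Int.ofNat k := fun k => Int.natCast_nonneg k
  have hneg : ∀ k : ℕ, ¬ (0:Int) ≤ Int.negSucc k := fun k => by
    rw [Int.negSucc_eq]; omega
  have hval : ∀ k : ℕ, (-(Int.negSucc k) - 1) = (k : Int) := fun k => by
    rw [Int.negSucc_eq]; ring
  intro a b
  cases a with
  | ofNat m =>
    cases b with
    | ofNat n =>
      unfold PySem.Int.bxor
      rw [if_pos (hpos m), if_pos (hpos n)]
      rfl
    | negSucc n =>
      unfold PySem.Int.bxor
      rw [if_pos (hpos m), if_neg (hneg n), hval n, Int.toNat_natCast]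
      show -((m ^^^ n : ℕ) : Int) - 1 = Int.negSucc (m ^^^ n)
      rw [Int.negSucc_eq]; ring
  | negSucc m =>
    cases b with
    | ofNat n =>
      unfold PySem.Int.bxor
      rw [if_neg (hneg m), if_pos (hpos n), hval m, Int.toNat_natCast]
      show -((m ^^^ n : ℕ) : Int) - 1 = Int.negSucc (m ^^^ n)
      rw [Int.negSucc_eq]; ring
    | negSucc n =>
      unfold PySem.Int.bxor
      rw [if_neg (hneg m), if_neg (hneg n), hval m, hval n, Int.toNat_natCast,
        Int.toNat_natCast]
      rfl

theorem not_eq_lnot : ∀ x : Int, Int.not x = Int.lnot x := by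
  intro x; cases x <;> rfl

-- "(z >> n) & 1 is truthy" is exactly testBit.
theorem band_shift_one (z : Int) (n : Nat) :
    (PySem.Int.band (z >>> n) 1 ≠ 0) ↔ z.testBit n = true := by
  rw [PySem.Int.band_one, PySem.Int.mod_eq_emod_of_pos (by norm_num), Int.shiftRight_eq_div_pow]
  cases z with
  | ofNat m =>
    have hc : ((Int.ofNat m) / ((2^n : Nat) : Int)) % 2 = ((m / 2^n % 2 : Nat) : Int) := by
      norm_cast
    have ht : (Int.ofNat m).testBit n = decide (m / 2^n % 2 = 1) := by
      show (Nat.testBit m n) = _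
      rw [Nat.testBit_eq_decide_div_mod_eq]
    rw [hc, ht]
    rcases Nat.mod_two_eq_zero_or_one (m / 2^n) with h | h <;> simp [h]
  | negSucc m =>
    have hKpos : 0 < 2^n := by positivity
    have ht : (Int.negSucc m).testBit n = !decide (m / 2^n % 2 = 1) := by
      show (!Nat.testBit m n) = _
      rw [Nat.testBit_eq_decide_div_mod_eq]
    generalize hK : (2:ℕ)^n = K at hKpos ht ⊢
    obtain ⟨q, r, hqr, hrlt, hqdef⟩ : ∃ q r, m = K * q + r ∧ r < K ∧ q = m / K :=
      ⟨m / K, m % K, (Nat.div_add_mod m K).symm, Nat.mod_lt _ hKpos, rfl⟩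
    rw [← hqdef] at ht
    have e : (Int.negSucc m) = ((K : Nat) - 1 - r : Int) + (-(q:Int) - 1) * ((K : Nat) : Int) := by
      rw [Int.negSucc_eq]; push_cast [hqr]; ring
    have hc : ((K : Nat) : Int) ≠ 0 := by positivity
    have hdiv : (Int.negSucc m) / ((K : Nat) : Int) = -(q:Int) - 1 := by
      rw [e, Int.add_mul_ediv_right _ _ hc,
        Int.ediv_eq_zero_of_lt (by omega) (by omega)]
      ring
    rw [hdiv, ht]
    rcases Nat.mod_two_eq_zero_or_one q with h | h <;> simp [h] <;> omega

-- Per-step shape of A's loop body: the pair components are updated independently,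
-- guarded by the bits of the two difference masks.
theorem step_eq (b1 b2 : Int) (st : Option Int × Option Int) (i : Int) :
    (if PySem.Int.band ((PySem.Int.bxor b1 b2) >>> i.toNat) 1 ≠ 0 then
        if PySem.Int.band (b1 >>> i.toNat) 1 ≠ 0 then (some i, st.2) else (st.1, some i)
      else st)
    = (if (PySem.Int.band b1 (Int.not b2)).testBit i.toNat then some i else st.1,
       if (PySem.Int.band b2 (Int.not b1)).testBit i.toNat then some i else st.2) := by
  rw [show (PySem.Int.band b1 (Int.not b2)) = Int.land b1 (Int.lnot b2) by
        rw [band_eq_land, not_eq_lnot],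
      show (PySem.Int.band b2 (Int.not b1)) = Int.land b2 (Int.lnot b1) by
        rw [band_eq_land, not_eq_lnot]]
  simp only [band_shift_one, bxor_eq_xor, Int.testBit_lxor, Int.testBit_land, Int.testBit_lnot]
  cases hb1 : b1.testBit i.toNat <;> cases hb2 : b2.testBit i.toNat <;> simp

-- Folding two independent component updates is the pair of component folds.
theorem foldl_pair (l : List Int) (f g : Option Int → Int → Option Int)
    (a b : Option Int) :
    l.foldl (fun st i => (f st.1 i, g st.2 i)) (a, b) = (l.foldl f a, l.foldl g b) := by
  induction l generalizing a b with
  | nil => rfl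
  | cons x xs ihl => simp [List.foldl, ihl]

-- The highest set bit among bits 0..8, scanned bottom-up with overwrite (A's loop per component).
def hiBit (m : Int) : Option Int :=
  (PySem.List.pyRange 0 9 1).foldl (fun a (i : Int) => if m.testBit i.toNat then some i else a) none

theorem loopA_eq (b1 b2 : Int) :
    (PySem.List.pyRange 0 9 1).foldl
      (fun (st : Option Int × Option Int) (i : Int) =>
        if PySem.Int.band ((PySem.Int.bxor b1 b2) >>> i.toNat) 1 ≠ 0 then
          if PySem.Int.band (b1 >>> i.toNat) 1 ≠ 0 then (some i, st.2) else (st.1, some i)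
        else st)
      (none, none)
    = (hiBit (PySem.Int.band b1 (Int.not b2)), hiBit (PySem.Int.band b2 (Int.not b1))) := by
  have hfun : (fun (st : Option Int × Option Int) (i : Int) =>
      if PySem.Int.band ((PySem.Int.bxor b1 b2) >>> i.toNat) 1 ≠ 0 then
        if PySem.Int.band (b1 >>> i.toNat) 1 ≠ 0 then (some i, st.2) else (st.1, some i)
      else st)
      = (fun (st : Option Int × Option Int) (i : Int) =>
        ((fun a j => if (PySem.Int.band b1 (Int.not b2)).testBit (Int.toNat j) then some j else a) st.1 i,
         (fun a j => if (PySem.Int.band b2 (Int.not b1)).testBit (Int.toNat j) then some j else a) st.2 i)) := by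
    funext st i
    exact step_eq b1 b2 st i
  rw [hfun]
  unfold hiBit
  exact foldl_pair (PySem.List.pyRange 0 9 1)
    (fun a i => if (PySem.Int.band b1 (Int.not b2)).testBit i.toNat then some i else a)
    (fun a i => if (PySem.Int.band b2 (Int.not b1)).testBit i.toNat then some i else a)
    none none

-- Bits >= 9 never matter to hiBit: masking with 511 is invisible.
theorem hiBit_mask (m : Int) : hiBit m = hiBit (PySem.Int.band m 511) := by
  have hb : ∀ k : Nat, k < 9 → (PySem.Int.band m 511).testBit k = m.testBit k := by
    intro k hk
    rw [band_eq_land, Int.testBit_land]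
    have h511 : (511 : Int).testBit k = true := by interval_cases k <;> decide
    simp [h511]
  unfold hiBit
  refine (PySem.List.foldl_congr_mem _ _ _ _ ?_)
  intro a x hx
  have hx' : (0:Int) ≤ x ∧ x < 9 := by
    have hmem : x ∈ ([0,1,2,3,4,5,6,7,8] : List Int) := by
      have he : PySem.List.pyRange 0 9 1 = ([0,1,2,3,4,5,6,7,8] : List Int) := by decide
      rw [← he]; exact hx
    fin_cases hmem <;> norm_num
  rw [hb x.toNat (by omega)]

theorem band511_nonneg (m : Int) : 0 ≤ PySem.Int.band m 511 := by
  rw [PySem.Int.band_comm]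
  exact PySem.Int.band_nonneg_of_nonneg_left m (by norm_num)

theorem band511_lt (m : Int) : PySem.Int.band m 511 < 512 := by
  rw [band_eq_land]
  cases m with
  | ofNat m =>
    have h : m &&& 511 ≤ 511 := Nat.and_le_right
    have he : Int.land (Int.ofNat m) 511 = ((m &&& 511 : Nat) : Int) := rfl
    rw [he]; omega
  | negSucc m =>
    have he : Int.land (Int.negSucc m) 511 = ((Nat.ldiff 511 m : Nat) : Int) := rfl
    rw [he]
    have h := nat_sub_and_eq_ldiff 511 m
    omega

-- On nonzero 9-bit masks, hiBit is bit_length - 1.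
set_option maxRecDepth 16384 in
theorem hiBit_small : ∀ k : Fin 512, (k : ℕ) ≠ 0 →
    hiBit (((k : ℕ) : Nat) : Int) = some ((PySem.Int.bitLength (((k : ℕ) : Nat) : Int) : Int) - 1) := by
  decide

theorem hiBit_band511 (m : Int) (h : PySem.Int.band m 511 ≠ 0) :
    hiBit m = some ((PySem.Int.bitLength (PySem.Int.band m 511) : Int) - 1) := by
  rw [hiBit_mask m]
  have h0 := band511_nonneg m
  have h1 := band511_lt m
  obtain ⟨k, hk⟩ := Int.eq_ofNat_of_zero_le h0
  have hk512 : k < 512 := by omega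
  have hkne : k ≠ 0 := by
    intro h'; apply h; rw [hk, h']; rfl
  have hfin := hiBit_small ⟨k, hk512⟩ hkne
  simpa [hk] using hfin

-- ===== VERDICT (by name: the statement is the Claim_ definition above) =====
theorem get_move_from_bitboards_spec : Claim_equal_get_move_from_bitboards := by
  intro b1 b2 _ hpre
  unfold Spec_get_move_from_bitboards
  obtain ⟨hs, he⟩ := hpre
  show get_move_from_bitboards b1 b2 = get_move_from_bitboards_alt b1 b2
  simp only [get_move_from_bitboards, get_move_from_bitboards_alt]
  rw [loopA_eq b1 b2, hiBit_band511 _ hs, hiBit_band511 _ he]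
  simp [hs, he]
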